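-- pv_equiv track=rewrite | github.com/pongmorrakot/frequent-typo | typocheck.py | correct2
-- ===== SOURCE A (Python) =====
-- charlist = ["1","!","2","@","3","#","4","$","5","%","6","^","7","&","8","*","9","(","0",")","-","_","=","+","q","Q","w","W","e","E","r","R","t","T","y","Y","u","U","i","I","o","O","p","P","[","{","]","}","a","A","s","S","d","D","f","F","g","G","h","H","j","J","k","K","l","L",";",":","z","Z","x","X","c","C","v","V","b","B","n","N","m","M",",","<",".",">","/","?","`","~"]
--
-- def compare(str1, str2):
--     # compare the correct and typo strings
--     # locate the index where it's different
--     return str1 == str2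
--
-- def insert(str1, index, char):
--     # modify the string by insertion
--     return str1[:index] + char + str1[index:]
--
-- def delete(str1, index ):
--     # modify a string by deletion
--     return str1[:index] + str1[index+1:]
--
-- def transpose(str1, index1, index2):
--     # modify the string by switching two characters
--     return str1[:index1] + str1[index2] + str1[index1+1:index2] + str1[index1] + str1[index2+1:]
--
-- def substitute(str1, index, char):
--     # modify the string by substitute a char
--     return str1[:index] + char + str1[index+1:]
--
-- def correct2(orig, typo, step):
--     for t in range(len(typo)):
--         if compare(orig, delete(typo,t)):
--             return step + "d"
--         for u in range(len(typo)):
--             if compare(orig, transpose(typo, t, u)):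
--                 return step + "t"
--         for c in charlist:
--             if compare(orig, insert(typo, t, c)):
--                 return step + "i"
--             elif compare(orig, substitute(typo, t, c)):
--                 return step + "s"
--     return "x"
-- ===== SOURCE B (Python) =====
-- charlist = ["1","!","2","@","3","#","4","$","5","%","6","^","7","&","8","*","9","(","0",")","-","_","=","+","q","Q","w","W","e","E","r","R","t","T","y","Y","u","U","i","I","o","O","p","P","[","{","]","}","a","A","s","S","d","D","f","F","g","G","h","H","j","J","k","K","l","L",";",":","z","Z","x","X","c","C","v","V","b","B","n","N","m","M",",","<",".",">","/","?","`","~"]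
--
-- CHARSET = frozenset(charlist)
--
-- def _lcp(x, y):
--     # length of the longest common prefix
--     p = 0
--     for a, b in zip(x, y):
--         if a != b:
--             break
--         p += 1
--     return p
--
-- def correct2(orig, typo, step):
--     # One linear pass: the common prefix/suffix lengths decide which single
--     # edit (delete / swap / insert / substitute) turns typo into orig.
--     n, m = len(typo), len(orig)
--     if orig == typo:
--         return "x"
--     p = _lcp(orig, typo)
--     s = _lcp(orig[::-1], typo[::-1])
--     if m == n - 1:
--         return step + "d" if p + s >= n - 1 else "x"
--     if m == n:
--         if p + s >= n - 1:
--             return step + "s" if orig[p] in CHARSET else "x"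
--         q = n - 1 - s
--         if orig[p] == typo[q] and orig[q] == typo[p] and orig[p + 1:q] == typo[p + 1:q]:
--             return step + "t"
--         return "x"
--     if m == n + 1:
--         return step + "i" if p + s >= n and orig[p] in CHARSET else "x"
--     return "x"
-- ===== Notes on version B (the rewrite author's own statement) =====
-- stated objective: faster
-- what changed: A tries every candidate edit (delete, transpose over all position pairs, insert/substitute over a 98-char alphabet at every position) and compares whole strings; B makes one linear pass computing the common prefix and suffix lengths and decides the operation from the length difference plus a handful of character/segment comparisons.
-- intended difference: On inputs where A's verdict contradicts single-edit semantics B returns the intended code: when orig == typo A still reports 's' or 't' (its substitute/transpose probes fire on charlist members or duplicate characters) while B reports 'x'; when orig is typo with one character duplicated A reports 't' via its degenerate transpose(t,t) while B reports 'i' (or 'x' for a non-charlist char) since it is an insertion; when orig is typo plus a fresh trailing charlist character A reports 'x' (its insertion loop stops one position short of the end) while B reports 'i'; … — e.g. on correct2("ab", "ab", ""): A returns "s", B returns "x"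
import Mathlib
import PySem

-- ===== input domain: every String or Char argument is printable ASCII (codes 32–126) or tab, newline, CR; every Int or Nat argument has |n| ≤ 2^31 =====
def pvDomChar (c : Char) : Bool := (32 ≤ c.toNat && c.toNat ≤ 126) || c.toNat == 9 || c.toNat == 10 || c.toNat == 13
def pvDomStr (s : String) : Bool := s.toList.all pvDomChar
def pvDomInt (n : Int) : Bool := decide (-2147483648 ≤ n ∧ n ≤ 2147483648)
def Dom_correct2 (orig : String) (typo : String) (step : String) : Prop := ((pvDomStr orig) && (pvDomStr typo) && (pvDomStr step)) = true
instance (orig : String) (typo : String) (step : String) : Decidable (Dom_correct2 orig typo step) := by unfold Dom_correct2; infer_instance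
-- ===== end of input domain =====

-- B replaces A's cubic scan over candidate edits by one linear common-prefix/common-suffix pass (objective: faster); on the exceptional inputs in D_ below, A's answer is an artefact and B returns the intended code.

-- ===== PORT A =====
def charlistP : List Char := ['1','!','2','@','3','#','4','$','5','%','6','^','7','&','8','*','9','(','0',')','-','_','=','+','q','Q','w','W','e','E','r','R','t','T','y','Y','u','U','i','I','o','O','p','P','[','{',']','}','a','A','s','S','d','D','f','F','g','G','h','H','j','J','k','K','l','L',';',':','z','Z','x','X','c','C','v','V','b','B','n','N','m','M',',','<','.','>','/','?','`','~']

def pycompare (s1 s2 : List Char) : Bool := s1 == s2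

def pyinsert (s : List Char) (i : Int) (c : Char) : List Char :=
  PySem.List.slice s none (some i) ++ [c] ++ PySem.List.slice s (some i) none

def pydelete (s : List Char) (i : Int) : List Char :=
  PySem.List.slice s none (some i) ++ PySem.List.slice s (some (i+1)) none

-- str1[index2] / str1[index1] are ported with pyGetD: the call sites below only index with t, u from range(len(typo))
def pytranspose (s : List Char) (i1 i2 : Int) : List Char :=
  PySem.List.slice s none (some i1) ++ [PySem.List.pyGetD s i2 ' ']
    ++ PySem.List.slice s (some (i1+1)) (some i2) ++ [PySem.List.pyGetD s i1 ' ']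
    ++ PySem.List.slice s (some (i2+1)) none

def pysubst (s : List Char) (i : Int) (c : Char) : List Char :=
  PySem.List.slice s none (some i) ++ [c] ++ PySem.List.slice s (some (i+1)) none

def c2loopC (o z : List Char) (step : String) (t : Int) : List Char → Option String
  | [] => none
  | c :: cs =>
    if pycompare o (pyinsert z t c) then some (step ++ "i")
    else if pycompare o (pysubst z t c) then some (step ++ "s")
    else c2loopC o z step t cs

def c2loopU (o z : List Char) (step : String) (t : Int) : List Int → Option String
  | [] => none
  | u :: us =>
    if pycompare o (pytranspose z t u) then some (step ++ "t")
    else c2loopU o z step t us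

def c2loopT (o z : List Char) (step : String) : List Int → Option String
  | [] => none
  | t :: ts =>
    if pycompare o (pydelete z t) then some (step ++ "d")
    else match c2loopU o z step t (PySem.List.pyRange 0 (z.length : Int) 1) with
      | some r => some r
      | none => match c2loopC o z step t charlistP with
        | some r => some r
        | none => c2loopT o z step ts

def correct2 (orig : String) (typo : String) (step : String) : String :=
  match c2loopT orig.toList typo.toList step (PySem.List.pyRange 0 (PySem.Str.len typo) 1) with
  | some r => r
  | none => "x"

-- ===== PORT B =====
def lcpC : List Char → List Char → Nat
  | a :: x, b :: y => if a = b then lcpC x y + 1 else 0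
  | _, _ => 0

def charsetB : List Char := PySem.Set.ofList charlistP   -- frozenset(charlist)

def correct2_alt (orig : String) (typo : String) (step : String) : String :=
  let o := orig.toList
  let z := typo.toList
  let n : Int := PySem.Str.len typo
  let m : Int := PySem.Str.len orig
  if o = z then "x"
  else
    let p : Int := lcpC o z
    let s : Int := lcpC o.reverse z.reverse
    if m = n - 1 then
      if p + s ≥ n - 1 then step ++ "d" else "x"
    else if m = n then
      if p + s ≥ n - 1 then
        if charsetB.contains (o.getD p.toNat ' ') then step ++ "s" else "x"
      else
        let q : Int := n - 1 - s
        if o.getD p.toNat ' ' = z.getD q.toNat ' ' ∧ o.getD q.toNat ' ' = z.getD p.toNat ' '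
            ∧ PySem.List.slice o (some (p+1)) (some q) = PySem.List.slice z (some (p+1)) (some q) then
          step ++ "t"
        else "x"
    else if m = n + 1 then
      if p + s ≥ n ∧ charsetB.contains (o.getD p.toNat ' ') then step ++ "i" else "x"
    else "x"

-- ===== PRECONDITION & SPEC =====
-- Input-level shapes used by D_ (conditions on the argument strings only):
-- typo with one character duplicated
def dupOf (o z : List Char) : Bool :=
  (List.range z.length).any fun t => o == z.take t ++ z.getD t ' ' :: z.drop t
-- typo with one fresh charlist character appended at the very end
def endInsOf (o z : List Char) : Bool :=
  (o.take z.length == z) && charlistP.contains (o.getD z.length ' ')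
    && (decide (z.length = 0) || decide (o.getD z.length ' ' ≠ z.getD (z.length - 1) ' '))
-- orig matches typo[:t] + typo[u] + typo[t] + typo[u+1:] for some u < t (two chars longer than typo)
def stretchOf (o z : List Char) : Bool :=
  (List.range z.length).any fun t => (List.range t).any fun u =>
    o == z.take t ++ z.getD u ' ' :: z.getD t ' ' :: z.drop (u+1)

-- On these exceptional inputs A's answer contradicts single-edit semantics and B returns the intended
-- code: orig == typo (A reports 's'/'t' picked by accidental charlist membership or duplicate positions,
-- B reports 'x': nothing was edited); orig == typo with one character duplicated (A reports 't' via its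
-- degenerate transpose(t,t), B reports 'i' for a charlist character else 'x': it is an insertion, not a
-- swap); orig == typo plus a fresh trailing charlist character (A reports 'x' because its insertion loop
-- stops one position short, B reports 'i'); orig two or more characters longer than typo yet matching
-- A's malformed transpose(t,u) with u < t (A reports 't', B reports 'x': no single edit applies).
def D_correct2 (orig : String) (typo : String) (step : String) : Prop :=
  (orig = typo ∧ orig ≠ "" ∧ ((orig.toList.any fun c => charlistP.contains c) = true ∨ ¬ orig.toList.Nodup))
  ∨ (orig.toList.length = typo.toList.length + 1
      ∧ (dupOf orig.toList typo.toList = true ∨ endInsOf orig.toList typo.toList = true))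
  ∨ (typo.toList.length + 2 ≤ orig.toList.length ∧ stretchOf orig.toList typo.toList = true)
instance (orig : String) (typo : String) (step : String) : Decidable (D_correct2 orig typo step) := by unfold D_correct2; infer_instance

def Spec_correct2 (orig : String) (typo : String) (step : String) (out : String) : Prop := ¬ D_correct2 orig typo step → out = correct2_alt orig typo step
instance (orig : String) (typo : String) (step : String) (out : String) : Decidable (Spec_correct2 orig typo step out) := by unfold Spec_correct2; infer_instance

def pvDiffWitness_correct2 : String × String × String := ("ab", "ab", "")
def pvDiffWitnessOut_correct2 : String × String := ("s", "x")

-- ===== CLAIM (what is proved, stated in full; the proofs are below) =====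
def Claim_unchanged_correct2 : Prop := ∀ (orig : String) (typo : String) (step : String), Dom_correct2 orig typo step → Spec_correct2 orig typo step (correct2 orig typo step)
def Claim_changed_correct2 : Prop := Dom_correct2 (pvDiffWitness_correct2.1) (pvDiffWitness_correct2.2.1) (pvDiffWitness_correct2.2.2) ∧ D_correct2 (pvDiffWitness_correct2.1) (pvDiffWitness_correct2.2.1) (pvDiffWitness_correct2.2.2) ∧ correct2 (pvDiffWitness_correct2.1) (pvDiffWitness_correct2.2.1) (pvDiffWitness_correct2.2.2) = pvDiffWitnessOut_correct2.1 ∧ correct2_alt (pvDiffWitness_correct2.1) (pvDiffWitness_correct2.2.1) (pvDiffWitness_correct2.2.2) = pvDiffWitnessOut_correct2.2 ∧ pvDiffWitnessOut_correct2.1 ≠ pvDiffWitnessOut_correct2.2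
def Claim_exact_correct2 : Prop := ∀ (orig : String) (typo : String) (step : String), Dom_correct2 orig typo step → D_correct2 orig typo step → correct2 orig typo step ≠ correct2_alt orig typo step

-- ===== LEMMAS AND PROOFS =====
theorem eq_append_iff' {α : Type} (o a b : List α) :
    o = a ++ b ↔ o.take a.length = a ∧ o.drop a.length = b := by
  constructor
  · rintro rfl; simp
  · rintro ⟨h1, h2⟩; rw [← h1, ← h2, List.take_append_drop]

theorem drop_cons_iff {α : Type} (o : List α) (t : Nat) (c : α) (r : List α) :
    o.drop t = c :: r ↔ o[t]? = some c ∧ o.drop (t+1) = r := by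
  by_cases h : t < o.length
  · rw [List.drop_eq_getElem_cons h, List.getElem?_eq_getElem h]
    constructor
    · rintro hc; injection hc with h1 h2; exact ⟨by rw [h1], h2⟩
    · rintro ⟨h1, h2⟩; injection h1 with h1; rw [h1, h2]
  · rw [List.drop_eq_nil_of_le (by omega), List.getElem?_eq_none (by omega)]
    simp

theorem lcpC_le_left (o z : List Char) : lcpC o z ≤ o.length := by
  induction o generalizing z with
  | nil => simp [lcpC]
  | cons a x ih =>
    cases z with
    | nil => simp [lcpC]
    | cons b y =>
      simp only [lcpC]; split
      · simpa using ih y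
      · simp

theorem lcpC_le_right (o z : List Char) : lcpC o z ≤ z.length := by
  induction o generalizing z with
  | nil => simp [lcpC]
  | cons a x ih =>
    cases z with
    | nil => simp [lcpC]
    | cons b y => simp only [lcpC]; split <;> simp; exact ih y

theorem take_lcpC (o z : List Char) : o.take (lcpC o z) = z.take (lcpC o z) := by
  induction o generalizing z with
  | nil => simp [lcpC]
  | cons a x ih =>
    cases z with
    | nil => simp [lcpC]
    | cons b y =>
      simp only [lcpC]; split
      · next h => simp [List.take_succ_cons, h, ih y]
      · simp

theorem getElem?_lcpC_ne (o z : List Char) (h1 : lcpC o z < o.length) (h2 : lcpC o z < z.length) :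
    o[lcpC o z]? ≠ z[lcpC o z]? := by
  induction o generalizing z with
  | nil => simp at h1
  | cons a x ih =>
    cases z with
    | nil => simp at h2
    | cons b y =>
      simp only [lcpC] at *
      by_cases h : a = b
      · rw [if_pos h] at h1 h2 ⊢
        simpa using ih y (by simpa using h1) (by simpa using h2)
      · rw [if_neg h]
        simpa using h

theorem take_eq_iff_le_lcpC (o z : List Char) (t : Nat) (hm : t ≤ o.length) (hn : t ≤ z.length) :
    o.take t = z.take t ↔ t ≤ lcpC o z := by
  constructor
  · intro h
    by_contra hc
    rw [Nat.not_le] at hc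
    apply getElem?_lcpC_ne o z (by omega) (by omega)
    have := congrArg (fun l => l[lcpC o z]?) h
    simpa [List.getElem?_take, hc] using this
  · intro h
    have := congrArg (List.take t) (take_lcpC o z)
    simpa [List.take_take, Nat.min_eq_left h] using this

theorem pointwise_lcpC (o z : List Char) (i : Nat) (hi : i < lcpC o z) : o[i]? = z[i]? := by
  have := congrArg (fun l => l[i]?) (take_lcpC o z)
  simpa [List.getElem?_take, hi] using this

theorem lcpC_pos_iff (x y : List Char) :
    1 ≤ lcpC x y ↔ ∃ a, x.head? = some a ∧ y.head? = some a := by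
  cases x with
  | nil => simp [lcpC]
  | cons a x' =>
    cases y with
    | nil => simp [lcpC]
    | cons b y' =>
      simp only [lcpC, List.head?_cons]
      by_cases h : a = b
      · subst h
        rw [if_pos rfl]
        constructor
        · intro _; exact ⟨a, rfl, rfl⟩
        · intro _; omega
      · rw [if_neg h]
        constructor
        · omega
        · rintro ⟨c, hc1, hc2⟩
          injection hc1 with hc1; injection hc2 with hc2
          exact absurd (hc1.trans hc2.symm) h

theorem drop_eq_iff_lcs (o z : List Char) (i j : Nat) (hi : i ≤ o.length) (hj : j ≤ z.length)
    (hL : o.length - i = z.length - j) :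
    o.drop i = z.drop j ↔ o.length - i ≤ lcpC o.reverse z.reverse := by
  rw [← List.reverse_inj, List.reverse_drop, List.reverse_drop, ← hL]
  exact take_eq_iff_le_lcpC o.reverse z.reverse _ (by simp) (by simp; omega)

theorem suffix_pointwise (o z : List Char) (k : Nat) (hk : k < lcpC o.reverse z.reverse) :
    o[o.length - 1 - k]? = z[z.length - 1 - k]? := by
  have h1 : k < o.length := by have := lcpC_le_left o.reverse z.reverse; simp at this; omega
  have h2 : k < z.length := by have := lcpC_le_right o.reverse z.reverse; simp at this; omega
  have := pointwise_lcpC o.reverse z.reverse k hk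
  rwa [List.getElem?_reverse (by simpa), List.getElem?_reverse (by simpa)] at this

theorem pydelete_eq (z : List Char) (t : Nat) :
    pydelete z (t:Int) = z.take t ++ z.drop (t+1) := by
  unfold pydelete
  have h1 : ((t:Int)+1) = ((t+1:Nat):Int) := by push_cast; ring
  rw [PySem.List.slice_to_natCast, h1, PySem.List.slice_from_natCast]

theorem pyinsert_eq (z : List Char) (t : Nat) (c : Char) :
    pyinsert z (t:Int) c = z.take t ++ c :: z.drop t := by
  unfold pyinsert
  rw [PySem.List.slice_to_natCast, PySem.List.slice_from_natCast]
  simp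

theorem pysubst_eq (z : List Char) (t : Nat) (c : Char) :
    pysubst z (t:Int) c = z.take t ++ c :: z.drop (t+1) := by
  unfold pysubst
  have h1 : ((t:Int)+1) = ((t+1:Nat):Int) := by push_cast; ring
  rw [PySem.List.slice_to_natCast, h1, PySem.List.slice_from_natCast]
  simp

theorem pytranspose_eq (z : List Char) (t u : Nat) (ht : t < z.length) (hu : u < z.length) :
    pytranspose z (t:Int) (u:Int)
      = z.take t ++ z[u] :: ((z.drop (t+1)).take (u - (t+1)) ++ z[t] :: z.drop (u+1)) := by
  unfold pytranspose
  have h1 : ((t:Int)+1) = ((t+1:Nat):Int) := by push_cast; ring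
  have h2 : ((u:Int)+1) = ((u+1:Nat):Int) := by push_cast; ring
  rw [PySem.List.slice_to_natCast, h1, h2, PySem.List.slice_natCast,
    PySem.List.slice_from_natCast, PySem.List.pyGetD_natCast, PySem.List.pyGetD_natCast,
    List.getD_eq_getElem z ' ' ht, List.getD_eq_getElem z ' ' hu]
  simp

theorem length_pydelete (z : List Char) (t : Nat) (ht : t < z.length) :
    (pydelete z (t:Int)).length = z.length - 1 := by
  rw [pydelete_eq]
  simp only [List.length_append, List.length_take, List.length_drop]
  omega

theorem length_pyinsert (z : List Char) (t : Nat) (c : Char) (ht : t ≤ z.length) :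
    (pyinsert z (t:Int) c).length = z.length + 1 := by
  rw [pyinsert_eq]
  simp only [List.length_append, List.length_take, List.length_cons, List.length_drop]
  omega

theorem length_pysubst (z : List Char) (t : Nat) (c : Char) (ht : t < z.length) :
    (pysubst z (t:Int) c).length = z.length := by
  rw [pysubst_eq]
  simp only [List.length_append, List.length_take, List.length_cons, List.length_drop]
  omega

theorem length_pytranspose (z : List Char) (t u : Nat) (ht : t < z.length) (hu : u < z.length) :
    (pytranspose z (t:Int) (u:Int)).length
      = if u ≤ t then z.length + 1 + (t - u) else z.length := by
  rw [pytranspose_eq z t u ht hu]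
  simp only [List.length_append, List.length_take, List.length_cons, List.length_drop]
  split <;> omega

def hit (o z : List Char) (step : String) (t : Int) : Option String :=
  if o = pydelete z t then some (step ++ "d")
  else if (PySem.List.pyRange 0 (z.length:Int) 1).any (fun u => o == pytranspose z t u) then some (step ++ "t")
  else if charlistP.any (fun c => o == pyinsert z t c) then some (step ++ "i")
  else if charlistP.any (fun c => o == pysubst z t c) then some (step ++ "s")
  else none

theorem loopU_eq (o z : List Char) (step : String) (t : Int) (us : List Int) :
    c2loopU o z step t us
      = if us.any (fun u => o == pytranspose z t u) then some (step ++ "t") else none := by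
  induction us with
  | nil => simp [c2loopU]
  | cons u us ih =>
    simp only [c2loopU, pycompare, List.any_cons]
    by_cases h : (o == pytranspose z t u) = true
    · simp [h]
    · simp only [Bool.not_eq_true] at h
      simp [h, ih]

theorem loopC_eq (o z : List Char) (step : String) (t : Int) (h0 : 0 ≤ t)
    (hn : t < (z.length:Int)) (cs : List Char) :
    c2loopC o z step t cs
      = if cs.any (fun c => o == pyinsert z t c) then some (step ++ "i")
        else if cs.any (fun c => o == pysubst z t c) then some (step ++ "s") else none := by
  have htN : t = ((t.toNat : Nat) : Int) := by omega
  have hins : ∀ c, o = pyinsert z t c → o.length = z.length + 1 := by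
    intro c h
    rw [h, htN, length_pyinsert z t.toNat c (by omega)]
  have hsub : ∀ c, o = pysubst z t c → o.length = z.length := by
    intro c h
    rw [h, htN, length_pysubst z t.toNat c (by omega)]
  induction cs with
  | nil => simp [c2loopC]
  | cons c cs ih =>
    simp only [c2loopC, pycompare]
    by_cases h1 : o = pyinsert z t c
    · rw [if_pos (show (o == pyinsert z t c) = true by simp [h1]),
        if_pos (show ((c :: cs).any fun x => o == pyinsert z t x) = true by simp [List.any_cons, h1])]
    · by_cases h2 : o = pysubst z t c
      · have hA : (cs.any fun c' => o == pyinsert z t c') = false := by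
          rw [List.any_eq_false]
          intro c' _
          simp only [beq_iff_eq]
          intro hc
          have := hins c' hc
          have := hsub c h2
          omega
        rw [if_neg (show ¬ (o == pyinsert z t c) = true by simp [h1]),
          if_pos (show (o == pysubst z t c) = true by simp [h2]),
          if_neg (show ¬ ((c :: cs).any fun x => o == pyinsert z t x) = true by
            simp only [List.any_cons, hA, Bool.or_false]; simp [h1]),
          if_pos (show ((c :: cs).any fun x => o == pysubst z t x) = true by simp [List.any_cons, h2])]
      · rw [if_neg (show ¬ (o == pyinsert z t c) = true by simp [h1]),
          if_neg (show ¬ (o == pysubst z t c) = true by simp [h2]), ih,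
          show ((c :: cs).any fun x => o == pyinsert z t x) = (cs.any fun x => o == pyinsert z t x) by
            simp only [List.any_cons]; simp [h1],
          show ((c :: cs).any fun x => o == pysubst z t x) = (cs.any fun x => o == pysubst z t x) by
            simp only [List.any_cons]; simp [h2]]

theorem loopT_eq (o z : List Char) (step : String) (ts : List Int)
    (h : ∀ t ∈ ts, 0 ≤ t ∧ t < (z.length:Int)) :
    c2loopT o z step ts = ts.findSome? (hit o z step) := by
  induction ts with
  | nil => simp [c2loopT]
  | cons t ts ih =>
    obtain ⟨h1, h2⟩ := h t (by simp)
    rw [List.findSome?_cons]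
    simp only [c2loopT, pycompare]
    rw [loopU_eq, loopC_eq o z step t h1 h2]
    by_cases hd : o = pydelete z t
    · simp [hit, hd]
    · by_cases htr : ((PySem.List.pyRange 0 (z.length:Int) 1).any (fun u => o == pytranspose z t u)) = true
      · simp [hit, hd, htr]
      · simp only [Bool.not_eq_true] at htr
        by_cases hi : (charlistP.any (fun c => o == pyinsert z t c)) = true
        · simp [hit, hd, htr, hi]
        · simp only [Bool.not_eq_true] at hi
          by_cases hs : (charlistP.any (fun c => o == pysubst z t c)) = true
          · simp [hit, hd, htr, hi, hs]
          · simp only [Bool.not_eq_true] at hs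
            simp [hit, hd, htr, hi, hs, ih (fun x hx => h x (by simp [hx]))]

theorem correct2_eq (orig typo step : String) :
    correct2 orig typo step
      = ((PySem.List.pyRange 0 (typo.toList.length:Int) 1).findSome? (hit orig.toList typo.toList step)).getD "x" := by
  unfold correct2
  have hlen : PySem.Str.len typo = (typo.toList.length : Int) := by
    simp [pysem]
  rw [hlen, loopT_eq]
  · cases ((PySem.List.pyRange 0 ((typo.toList.length : Nat):Int) 1).findSome? (hit orig.toList typo.toList step)) <;> rfl
  · intro t ht
    rw [PySem.List.mem_pyRange_one] at ht
    exact ht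

theorem findSome?_const {α β : Type} (l : List α) (f : α → Option β) (r : β)
    (h : ∀ x ∈ l, f x = none ∨ f x = some r) :
    l.findSome? f = if l.any (fun x => (f x).isSome) then some r else none := by
  induction l with
  | nil => simp
  | cons a l ih =>
    rw [List.findSome?_cons]
    rcases h a (by simp) with ha | ha
    · rw [ha, ih (fun x hx => h x (by simp [hx]))]
      simp [ha]
    · rw [ha]
      simp [ha]

theorem findSome?_none {α β : Type} (l : List α) (f : α → Option β)
    (h : ∀ x ∈ l, f x = none) : l.findSome? f = none := by
  induction l with
  | nil => simp
  | cons a l ih =>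
    rw [List.findSome?_cons, h a (by simp), ih (fun x hx => h x (by simp [hx]))]

theorem any_pyRange_iff (n : Nat) (f : Int → Bool) :
    (((PySem.List.pyRange 0 (n:Int) 1).any f) = true) ↔ ∃ k : Nat, k < n ∧ f (k:Int) = true := by
  rw [List.any_eq_true]
  constructor
  · rintro ⟨x, hx, hfx⟩
    rw [PySem.List.mem_pyRange_one] at hx
    refine ⟨x.toNat, by omega, ?_⟩
    rwa [Int.toNat_of_nonneg hx.1]
  · rintro ⟨k, hk, hf⟩
    exact ⟨(k:Int), by rw [PySem.List.mem_pyRange_one]; omega, hf⟩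

theorem eq_take_append_iff (o z : List Char) (t : Nat) (ht : t ≤ z.length) (r : List Char) :
    o = z.take t ++ r ↔ o.take t = z.take t ∧ o.drop t = r := by
  rw [eq_append_iff']
  simp [List.length_take, Nat.min_eq_left ht]

theorem del_iff (o z : List Char) (t : Nat) (ht : t < z.length) :
    o = pydelete z (t:Int) ↔ o.take t = z.take t ∧ o.drop t = z.drop (t+1) := by
  rw [pydelete_eq, eq_take_append_iff o z t (le_of_lt ht)]

theorem ins_iff (o z : List Char) (t : Nat) (c : Char) (ht : t ≤ z.length) :
    o = pyinsert z (t:Int) c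
      ↔ o.take t = z.take t ∧ o[t]? = some c ∧ o.drop (t+1) = z.drop t := by
  rw [pyinsert_eq, eq_take_append_iff o z t ht, drop_cons_iff]

theorem sub_iff (o z : List Char) (t : Nat) (c : Char) (ht : t < z.length) :
    o = pysubst z (t:Int) c
      ↔ o.take t = z.take t ∧ o[t]? = some c ∧ o.drop (t+1) = z.drop (t+1) := by
  rw [pysubst_eq, eq_take_append_iff o z t (le_of_lt ht), drop_cons_iff]

theorem dup_iff (o z : List Char) (t : Nat) (ht : t < z.length) :
    o = pytranspose z (t:Int) (t:Int)
      ↔ o.take t = z.take t ∧ o[t]? = some (z[t]'ht) ∧ o.drop (t+1) = z.drop t := by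
  rw [pytranspose_eq z t t ht ht]
  have h0 : t - (t+1) = 0 := by omega
  rw [h0, List.take_zero, List.nil_append, ← List.drop_eq_getElem_cons ht,
    eq_take_append_iff o z t (le_of_lt ht), drop_cons_iff]

theorem trans_lt_eq (z : List Char) (t u : Nat) (hu : u < t) (ht : t < z.length) :
    pytranspose z (t:Int) (u:Int)
      = z.take t ++ z.getD u ' ' :: z.getD t ' ' :: z.drop (u+1) := by
  rw [pytranspose_eq z t u ht (by omega)]
  have h0 : u - (t+1) = 0 := by omega
  rw [h0, List.take_zero, List.nil_append,
    List.getD_eq_getElem z ' ' (show u < z.length by omega), List.getD_eq_getElem z ' ' ht]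

theorem trans_gt_iff (o z : List Char) (t u : Nat) (htu : t < u) (hu : u < z.length) :
    o = pytranspose z (t:Int) (u:Int)
      ↔ o.take t = z.take t ∧ o[t]? = some (z[u]'hu)
          ∧ (o.drop (t+1)).take (u-(t+1)) = (z.drop (t+1)).take (u-(t+1))
          ∧ o[u]? = some (z[t]'(by omega)) ∧ o.drop (u+1) = z.drop (u+1) := by
  rw [pytranspose_eq z t u (by omega) hu,
    eq_take_append_iff o z t (by omega), drop_cons_iff]
  have hmid : ((z.drop (t+1)).take (u-(t+1))).length = u-(t+1) := by
    simp [List.length_take, List.length_drop]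
    omega
  constructor
  · rintro ⟨h1, h2, h3⟩
    rw [eq_append_iff', hmid] at h3
    obtain ⟨h3, h4⟩ := h3
    rw [List.drop_drop] at h4
    have he : t + 1 + (u - (t+1)) = u := by omega
    rw [he, drop_cons_iff] at h4
    exact ⟨h1, h2, h3, h4.1, h4.2⟩
  · rintro ⟨h1, h2, h3, h4, h5⟩
    refine ⟨h1, h2, ?_⟩
    rw [eq_append_iff', hmid, List.drop_drop]
    have he : t + 1 + (u - (t+1)) = u := by omega
    rw [he, drop_cons_iff]
    exact ⟨h3, h4, h5⟩

theorem seg_pointwise (o z : List Char) (a b i : Nat)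
    (h : (o.drop a).take b = (z.drop a).take b) (h1 : a ≤ i) (h2 : i < a + b) :
    o[i]? = z[i]? := by
  have hc := congrArg (fun l => l[i-a]?) h
  simp only [List.getElem?_take, List.getElem?_drop] at hc
  have hlt : i - a < b := by omega
  have he : a + (i - a) = i := by omega
  simpa [hlt, he] using hc

theorem any_trans_iff (o z : List Char) (t : Int) :
    (((PySem.List.pyRange 0 (z.length:Int) 1).any fun u => o == pytranspose z t u) = true)
      ↔ ∃ u : Nat, u < z.length ∧ o = pytranspose z t (u:Int) := by
  rw [any_pyRange_iff]
  constructor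
  · rintro ⟨k, hk, h⟩
    simp only [beq_iff_eq] at h
    exact ⟨k, hk, h⟩
  · rintro ⟨k, hk, h⟩
    exact ⟨k, hk, by simp only [beq_iff_eq]; exact h⟩

theorem any_ins_iff (o z : List Char) (t : Int) :
    ((charlistP.any fun c => o == pyinsert z t c) = true) ↔ ∃ c ∈ charlistP, o = pyinsert z t c := by
  simp [List.any_eq_true]

theorem any_sub_iff (o z : List Char) (t : Int) :
    ((charlistP.any fun c => o == pysubst z t c) = true) ↔ ∃ c ∈ charlistP, o = pysubst z t c := by
  simp [List.any_eq_true]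

theorem strLen (s : String) : PySem.Str.len s = (s.toList.length : Int) := by
  simp [pysem]

theorem ps_lt_of_ne (o z : List Char) (hm : o.length = z.length) (hne : o ≠ z) :
    lcpC o z + lcpC o.reverse z.reverse < z.length := by
  by_contra hc
  rw [Nat.not_lt] at hc
  apply hne
  apply List.ext_getElem?
  intro i
  by_cases hi : i < z.length
  · by_cases hip : i < lcpC o z
    · exact pointwise_lcpC o z i hip
    · have hk : z.length - 1 - i < lcpC o.reverse z.reverse := by omega
      have := suffix_pointwise o z (z.length - 1 - i) hk
      have e1 : o.length - 1 - (z.length - 1 - i) = i := by omega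
      have e2 : z.length - 1 - (z.length - 1 - i) = i := by omega
      rwa [e1, e2] at this
  · rw [List.getElem?_eq_none (by omega), List.getElem?_eq_none (by omega)]

theorem p_lt_of_ne (o z : List Char) (hm : o.length = z.length) (hne : o ≠ z) :
    lcpC o z < z.length := by
  by_contra hc
  rw [Nat.not_lt] at hc
  apply hne
  have h1 := lcpC_le_left o z
  have h2 := lcpC_le_right o z
  have hp : lcpC o z = z.length := by omega
  have := take_lcpC o z
  rwa [hp, ← hm, List.take_length, hm, List.take_length] at this

theorem get_q_ne (o z : List Char) (hs1 : lcpC o.reverse z.reverse < o.length)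
    (hs2 : lcpC o.reverse z.reverse < z.length) :
    o[o.length - 1 - lcpC o.reverse z.reverse]? ≠ z[z.length - 1 - lcpC o.reverse z.reverse]? := by
  have := getElem?_lcpC_ne o.reverse z.reverse (by simpa) (by simpa)
  rwa [List.getElem?_reverse (by simpa), List.getElem?_reverse (by simpa)] at this

theorem no_del_len (o z : List Char) (t : Nat) (ht : t < z.length)
    (h : o.length + 1 ≠ z.length) : ¬(o = pydelete z (t:Int)) := by
  intro hc
  have := congrArg List.length hc
  rw [length_pydelete z t ht] at this
  omega

theorem no_ins_len (o z : List Char) (t : Nat) (ht : t < z.length)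
    (h : o.length ≠ z.length + 1) :
    ¬((charlistP.any fun c => o == pyinsert z (t:Int) c) = true) := by
  rw [any_ins_iff]
  rintro ⟨c, _, hc⟩
  have := congrArg List.length hc
  rw [length_pyinsert z t c (le_of_lt ht)] at this
  exact h this

theorem no_sub_len (o z : List Char) (t : Nat) (ht : t < z.length)
    (h : o.length ≠ z.length) :
    ¬((charlistP.any fun c => o == pysubst z (t:Int) c) = true) := by
  rw [any_sub_iff]
  rintro ⟨c, _, hc⟩
  have := congrArg List.length hc
  rw [length_pysubst z t c ht] at this
  exact h this

theorem no_trans_len (o z : List Char) (t : Nat) (ht : t < z.length)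
    (h1 : o.length ≠ z.length) (h2 : ∀ u : Nat, u ≤ t → o.length ≠ z.length + 1 + (t - u)) :
    ¬(((PySem.List.pyRange 0 (z.length:Int) 1).any fun u => o == pytranspose z (t:Int) u) = true) := by
  rw [any_trans_iff]
  rintro ⟨u, hu, hc⟩
  have hlen := congrArg List.length hc
  rw [length_pytranspose z t u ht hu] at hlen
  by_cases hut : u ≤ t
  · rw [if_pos hut] at hlen; exact h2 u hut hlen
  · rw [if_neg hut] at hlen; exact h1 hlen

theorem findSome?_pyRange_const (n : Nat) (f : Int → Option String) (r : String)
    (h : ∀ t : Nat, t < n → f (t:Int) = none ∨ f (t:Int) = some r) :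
    ((PySem.List.pyRange 0 (n:Int) 1).findSome? f)
      = if (∃ t : Nat, t < n ∧ (f (t:Int)).isSome) then some r else none := by
  rw [findSome?_const _ _ r]
  · by_cases he : ∃ t : Nat, t < n ∧ (f (t:Int)).isSome = true
    · rw [if_pos, if_pos he]
      rw [any_pyRange_iff n (fun x => (f x).isSome)]
      obtain ⟨t, htn, hsome⟩ := he
      exact ⟨t, htn, hsome⟩
    · rw [if_neg, if_neg he]
      rw [any_pyRange_iff n (fun x => (f x).isSome)]
      exact he
  · intro x hx
    rw [PySem.List.mem_pyRange_one] at hx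
    have hxn : x = ((x.toNat : Nat) : Int) := by omega
    rw [hxn]
    exact h x.toNat (by omega)

-- case |orig| + 2 ≤ |typo| : nothing can match
theorem hitE (o z : List Char) (step : String) (t : Nat) (ht : t < z.length)
    (hL : o.length + 2 ≤ z.length) : hit o z step (t:Int) = none := by
  unfold hit
  rw [if_neg (no_del_len o z t ht (by omega)),
    if_neg (no_trans_len o z t ht (by omega) (fun u hu => by omega)),
    if_neg (no_ins_len o z t ht (by omega)),
    if_neg (no_sub_len o z t ht (by omega))]

-- case |orig| + 1 = |typo| : only a deletion can match
theorem hitA (o z : List Char) (step : String) (t : Nat) (ht : t < z.length)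
    (hL : o.length + 1 = z.length) :
    hit o z step (t:Int)
      = if t ≤ lcpC o z ∧ o.length ≤ lcpC o.reverse z.reverse + t then some (step ++ "d")
        else none := by
  unfold hit
  have hdel_iff : (o = pydelete z (t:Int))
      ↔ (t ≤ lcpC o z ∧ o.length ≤ lcpC o.reverse z.reverse + t) := by
    rw [del_iff o z t ht, take_eq_iff_le_lcpC o z t (by omega) (by omega),
      drop_eq_iff_lcs o z t (t+1) (by omega) (by omega) (by omega)]
    omega
  by_cases hd : t ≤ lcpC o z ∧ o.length ≤ lcpC o.reverse z.reverse + t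
  · rw [if_pos (hdel_iff.mpr hd), if_pos hd]
  · rw [if_neg (fun hc => hd (hdel_iff.mp hc)), if_neg hd,
      if_neg (no_trans_len o z t ht (by omega) (fun u hu => by omega)),
      if_neg (no_ins_len o z t ht (by omega)),
      if_neg (no_sub_len o z t ht (by omega))]

theorem caseA_A (o z : List Char) (step : String) (hL : o.length + 1 = z.length) :
    ((PySem.List.pyRange 0 (z.length:Int) 1).findSome? (hit o z step))
      = if z.length ≤ lcpC o z + lcpC o.reverse z.reverse + 1 then some (step ++ "d") else none := by
  rw [findSome?_pyRange_const z.length (hit o z step) (step ++ "d")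
    (fun t htn => by rw [hitA o z step t htn hL]; split <;> simp)]
  by_cases hc : z.length ≤ lcpC o z + lcpC o.reverse z.reverse + 1
  · rw [if_pos, if_pos hc]
    refine ⟨min (lcpC o z) o.length, by omega, ?_⟩
    rw [hitA o z step _ (by omega) hL, if_pos (by constructor <;> omega)]
    simp
  · rw [if_neg, if_neg hc]
    rintro ⟨t, htn, hsome⟩
    rw [hitA o z step t htn hL] at hsome
    rw [if_neg (by omega)] at hsome
    simp at hsome

-- case |orig| = |typo|, exactly one mismatch: only a substitution can match
theorem hitB1 (o z : List Char) (step : String)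
    (hm : o.length = z.length) (hpo : lcpC o z < o.length)
    (h1 : z.length ≤ lcpC o z + lcpC o.reverse z.reverse + 1)
    (hps : lcpC o z + lcpC o.reverse z.reverse < z.length)
    (t : Nat) (ht : t < z.length) :
    hit o z step (t:Int)
      = if t = lcpC o z ∧ (∃ c ∈ charlistP, o[lcpC o z]? = some c) then some (step ++ "s")
        else none := by
  have hpn : lcpC o z < z.length := by omega
  have hmis : o[lcpC o z]? ≠ z[lcpC o z]? := getElem?_lcpC_ne o z hpo hpn
  have hpw2 : ∀ i, lcpC o z < i → i < z.length → o[i]? = z[i]? := by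
    intro i hpi hin
    have hk : z.length - 1 - i < lcpC o.reverse z.reverse := by omega
    have hsp := suffix_pointwise o z (z.length - 1 - i) hk
    have e1 : o.length - 1 - (z.length - 1 - i) = i := by omega
    have e2 : z.length - 1 - (z.length - 1 - i) = i := by omega
    rwa [e1, e2] at hsp
  unfold hit
  rw [if_neg (no_del_len o z t ht (by omega)),
    if_neg (show ¬(((PySem.List.pyRange 0 (z.length:Int) 1).any fun u => o == pytranspose z (t:Int) u) = true) by
      rw [any_trans_iff]
      rintro ⟨u, hu, hc⟩
      have hlen := congrArg List.length hc
      rw [length_pytranspose z t u ht hu] at hlen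
      by_cases hut : u ≤ t
      · rw [if_pos hut] at hlen; omega
      · have htu : t < u := by omega
        rw [trans_gt_iff o z t u htu hu] at hc
        obtain ⟨hc1, hc2, hc3, hc4, hc5⟩ := hc
        rw [take_eq_iff_le_lcpC o z t (by omega) (by omega)] at hc1
        rw [drop_eq_iff_lcs o z (u+1) (u+1) (by omega) (by omega) (by omega)] at hc5
        have huq : lcpC o z ≤ u := by omega
        rcases Nat.lt_or_ge t (lcpC o z) with htlt | htge
        · rcases Nat.lt_or_ge (lcpC o z) u with hplt | hpge
          · exact hmis (seg_pointwise o z (t+1) (u-(t+1)) (lcpC o z) hc3 (by omega) (by omega))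
          · have hpu : lcpC o z = u := by omega
            have hot : o[t]? = z[t]? := pointwise_lcpC o z t htlt
            apply hmis
            rw [hpu, hc4, List.getElem?_eq_getElem hu]
            have hzz : z[t]'(by omega) = z[u]'hu := by
              have h' : some (z[t]'(by omega)) = some (z[u]'hu) := by
                rw [← List.getElem?_eq_getElem, ← hot, hc2]
              injection h'
            rw [show (z[t]'(by omega) : Char) = z[u]'hu from hzz]
        · have htp : t = lcpC o z := by omega
          have hup : lcpC o z < u := by omega
          have hou : o[u]? = z[u]? := hpw2 u hup hu
          apply hmis
          have hzz : z[u]'hu = z[t]'(by omega) := by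
            have h' : some (z[u]'hu) = some (z[t]'(by omega)) := by
              rw [← List.getElem?_eq_getElem, ← hou, hc4]
            injection h'
          rw [← htp, hc2, List.getElem?_eq_getElem (show t < z.length by omega)]
          rw [show (z[u]'hu : Char) = z[t]'(by omega) from hzz]),
    if_neg (no_ins_len o z t ht (by omega))]
  have hsub_iff : ((charlistP.any fun c => o == pysubst z (t:Int) c) = true)
      ↔ (t = lcpC o z ∧ (∃ c ∈ charlistP, o[lcpC o z]? = some c)) := by
    rw [any_sub_iff]
    constructor
    · rintro ⟨c, hcl, hc⟩
      rw [sub_iff o z t c ht] at hc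
      obtain ⟨hc1, hc2, hc3⟩ := hc
      rw [take_eq_iff_le_lcpC o z t (by omega) (by omega)] at hc1
      rw [drop_eq_iff_lcs o z (t+1) (t+1) (by omega) (by omega) (by omega)] at hc3
      have htp : t = lcpC o z := by omega
      exact ⟨htp, ⟨c, hcl, by rw [← htp]; exact hc2⟩⟩
    · rintro ⟨htp, c, hcl, hc⟩
      refine ⟨c, hcl, ?_⟩
      rw [sub_iff o z t c ht]
      refine ⟨?_, by rw [htp]; exact hc, ?_⟩
      · rw [take_eq_iff_le_lcpC o z t (by omega) (by omega)]; omega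
      · rw [drop_eq_iff_lcs o z (t+1) (t+1) (by omega) (by omega) (by omega)]; omega
  by_cases hcond : t = lcpC o z ∧ (∃ c ∈ charlistP, o[lcpC o z]? = some c)
  · rw [if_pos (hsub_iff.mpr hcond), if_pos hcond]
  · rw [if_neg (fun hx => hcond (hsub_iff.mp hx)), if_neg hcond]

-- case |orig| = |typo|, two or more mismatches: only a transposition can match
theorem hitB2 (o z : List Char) (step : String)
    (hm : o.length = z.length)
    (h2m : lcpC o z + lcpC o.reverse z.reverse + 1 < z.length)
    (t : Nat) (ht : t < z.length) :
    hit o z step (t:Int)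
      = if t = lcpC o z
            ∧ o[lcpC o z]? = z[z.length - 1 - lcpC o.reverse z.reverse]?
            ∧ o[z.length - 1 - lcpC o.reverse z.reverse]? = z[lcpC o z]?
            ∧ (o.drop (lcpC o z + 1)).take (z.length - 1 - lcpC o.reverse z.reverse - (lcpC o z + 1))
                = (z.drop (lcpC o z + 1)).take (z.length - 1 - lcpC o.reverse z.reverse - (lcpC o z + 1))
          then some (step ++ "t") else none := by
  have hpn : lcpC o z < z.length := by omega
  have hsn : lcpC o.reverse z.reverse < z.length := by omega
  have hpq : lcpC o z < z.length - 1 - lcpC o.reverse z.reverse := by omega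
  have hqn : z.length - 1 - lcpC o.reverse z.reverse < z.length := by omega
  have hmisP : o[lcpC o z]? ≠ z[lcpC o z]? := getElem?_lcpC_ne o z (by omega) hpn
  have hmisQ : o[z.length - 1 - lcpC o.reverse z.reverse]? ≠ z[z.length - 1 - lcpC o.reverse z.reverse]? := by
    have := get_q_ne o z (by omega) hsn
    rwa [show o.length - 1 - lcpC o.reverse z.reverse = z.length - 1 - lcpC o.reverse z.reverse by omega] at this
  have hpw2 : ∀ i, z.length - 1 - lcpC o.reverse z.reverse < i → i < z.length → o[i]? = z[i]? := by
    intro i hpi hin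
    have hk : z.length - 1 - i < lcpC o.reverse z.reverse := by omega
    have hsp := suffix_pointwise o z (z.length - 1 - i) hk
    have e1 : o.length - 1 - (z.length - 1 - i) = i := by omega
    have e2 : z.length - 1 - (z.length - 1 - i) = i := by omega
    rwa [e1, e2] at hsp
  have htr_iff : (((PySem.List.pyRange 0 (z.length:Int) 1).any fun u => o == pytranspose z (t:Int) u) = true)
      ↔ (t = lcpC o z
            ∧ o[lcpC o z]? = z[z.length - 1 - lcpC o.reverse z.reverse]?
            ∧ o[z.length - 1 - lcpC o.reverse z.reverse]? = z[lcpC o z]?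
            ∧ (o.drop (lcpC o z + 1)).take (z.length - 1 - lcpC o.reverse z.reverse - (lcpC o z + 1))
                = (z.drop (lcpC o z + 1)).take (z.length - 1 - lcpC o.reverse z.reverse - (lcpC o z + 1))) := by
    rw [any_trans_iff]
    constructor
    · rintro ⟨u, hu, hc⟩
      have hlen := congrArg List.length hc
      rw [length_pytranspose z t u ht hu] at hlen
      by_cases hut : u ≤ t
      · rw [if_pos hut] at hlen; omega
      · have htu : t < u := by omega
        rw [trans_gt_iff o z t u htu hu] at hc
        obtain ⟨hc1, hc2, hc3, hc4, hc5⟩ := hc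
        rw [take_eq_iff_le_lcpC o z t (by omega) (by omega)] at hc1
        rw [drop_eq_iff_lcs o z (u+1) (u+1) (by omega) (by omega) (by omega)] at hc5
        have huq : z.length - 1 - lcpC o.reverse z.reverse ≤ u := by omega
        have htp : t = lcpC o z := by
          by_contra htne
          have htlt : t < lcpC o z := by omega
          exact hmisP (seg_pointwise o z (t+1) (u-(t+1)) (lcpC o z) hc3 (by omega) (by omega))
        have huqe : u = z.length - 1 - lcpC o.reverse z.reverse := by
          by_contra hune
          have hqlt : z.length - 1 - lcpC o.reverse z.reverse < u := by omega
          exact hmisQ (seg_pointwise o z (t+1) (u-(t+1)) _ hc3 (by omega) (by omega))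
        subst htp
        refine ⟨rfl, ?_, ?_, ?_⟩
        · rw [hc2, ← List.getElem?_eq_getElem hu, huqe]
        · rw [← huqe, hc4, List.getElem?_eq_getElem (show lcpC o z < z.length from ht)]
        · rw [← huqe]; exact hc3
    · rintro ⟨htp, hw1, hw2, hw3⟩
      refine ⟨z.length - 1 - lcpC o.reverse z.reverse, hqn, ?_⟩
      subst htp
      rw [trans_gt_iff o z _ _ hpq hqn]
      refine ⟨?_, ?_, hw3, ?_, ?_⟩
      · rw [take_eq_iff_le_lcpC o z _ (by omega) (by omega)]
      · rw [hw1, List.getElem?_eq_getElem hqn]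
      · rw [hw2, List.getElem?_eq_getElem (show lcpC o z < z.length from hpn)]
      · rw [drop_eq_iff_lcs o z _ _ (by omega) (by omega) (by omega)]; omega
  unfold hit
  rw [if_neg (no_del_len o z t ht (by omega))]
  by_cases hcond : (t = lcpC o z
      ∧ o[lcpC o z]? = z[z.length - 1 - lcpC o.reverse z.reverse]?
      ∧ o[z.length - 1 - lcpC o.reverse z.reverse]? = z[lcpC o z]?
      ∧ (o.drop (lcpC o z + 1)).take (z.length - 1 - lcpC o.reverse z.reverse - (lcpC o z + 1))
          = (z.drop (lcpC o z + 1)).take (z.length - 1 - lcpC o.reverse z.reverse - (lcpC o z + 1)))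
  · rw [if_pos (htr_iff.mpr hcond), if_pos hcond]
  · rw [if_neg (fun hx => hcond (htr_iff.mp hx)), if_neg hcond,
      if_neg (no_ins_len o z t ht (by omega)),
      if_neg (show ¬((charlistP.any fun c => o == pysubst z (t:Int) c) = true) by
        rw [any_sub_iff]
        rintro ⟨c, _, hc⟩
        rw [sub_iff o z t c ht] at hc
        obtain ⟨hc1, hc2, hc3⟩ := hc
        rw [take_eq_iff_le_lcpC o z t (by omega) (by omega)] at hc1
        rw [drop_eq_iff_lcs o z (t+1) (t+1) (by omega) (by omega) (by omega)] at hc3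
        omega)]

theorem caseB_A (o z : List Char) (step : String) (hm : o.length = z.length) (hne : o ≠ z) :
    ((PySem.List.pyRange 0 (z.length:Int) 1).findSome? (hit o z step))
      = if z.length ≤ lcpC o z + lcpC o.reverse z.reverse + 1 then
          (if (∃ c ∈ charlistP, o[lcpC o z]? = some c) then some (step ++ "s") else none)
        else
          (if (o[lcpC o z]? = z[z.length - 1 - lcpC o.reverse z.reverse]?
              ∧ o[z.length - 1 - lcpC o.reverse z.reverse]? = z[lcpC o z]?
              ∧ (o.drop (lcpC o z + 1)).take (z.length - 1 - lcpC o.reverse z.reverse - (lcpC o z + 1))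
                  = (z.drop (lcpC o z + 1)).take (z.length - 1 - lcpC o.reverse z.reverse - (lcpC o z + 1)))
            then some (step ++ "t") else none) := by
  have hps := ps_lt_of_ne o z hm hne
  have hpo : lcpC o z < o.length := by have := p_lt_of_ne o z hm hne; omega
  by_cases hone : z.length ≤ lcpC o z + lcpC o.reverse z.reverse + 1
  · rw [if_pos hone]
    rw [findSome?_pyRange_const z.length _ (step ++ "s")
      (fun t htn => by rw [hitB1 o z step hm hpo hone hps t htn]; split <;> simp)]
    by_cases hmem : ∃ c ∈ charlistP, o[lcpC o z]? = some c
    · rw [if_pos, if_pos hmem]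
      refine ⟨lcpC o z, by omega, ?_⟩
      rw [hitB1 o z step hm hpo hone hps _ (by omega), if_pos ⟨rfl, hmem⟩]
      rfl
    · rw [if_neg, if_neg hmem]
      rintro ⟨t, htn, hsome⟩
      rw [hitB1 o z step hm hpo hone hps t htn, if_neg (fun hx => hmem hx.2)] at hsome
      simp at hsome
  · rw [if_neg hone]
    have h2m : lcpC o z + lcpC o.reverse z.reverse + 1 < z.length := by omega
    by_cases hcond : (o[lcpC o z]? = z[z.length - 1 - lcpC o.reverse z.reverse]?
        ∧ o[z.length - 1 - lcpC o.reverse z.reverse]? = z[lcpC o z]?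
        ∧ (o.drop (lcpC o z + 1)).take (z.length - 1 - lcpC o.reverse z.reverse - (lcpC o z + 1))
            = (z.drop (lcpC o z + 1)).take (z.length - 1 - lcpC o.reverse z.reverse - (lcpC o z + 1)))
    · rw [findSome?_pyRange_const z.length _ (step ++ "t")
        (fun t htn => by rw [hitB2 o z step hm h2m t htn]; split <;> simp), if_pos, if_pos hcond]
      refine ⟨lcpC o z, by omega, ?_⟩
      rw [hitB2 o z step hm h2m _ (by omega), if_pos ⟨rfl, hcond⟩]
      rfl
    · rw [findSome?_pyRange_const z.length _ (step ++ "t")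
        (fun t htn => by rw [hitB2 o z step hm h2m t htn]; split <;> simp), if_neg, if_neg hcond]
      rintro ⟨t, htn, hsome⟩
      rw [hitB2 o z step hm h2m t htn, if_neg (fun hx => hcond hx.2)] at hsome
      simp at hsome

-- case |orig| = |typo| + 1 : only a duplication (transpose(t,t)) or an insertion can match
theorem hitC (o z : List Char) (step : String) (hm : o.length = z.length + 1)
    (t : Nat) (ht : t < z.length) :
    hit o z step (t:Int)
      = if z.length ≤ lcpC o.reverse z.reverse + t ∧ t < lcpC o z then some (step ++ "t")
        else if z.length ≤ lcpC o.reverse z.reverse + t ∧ t ≤ lcpC o z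
            ∧ (∃ c ∈ charlistP, o[t]? = some c) then some (step ++ "i")
        else none := by
  have hsle : lcpC o.reverse z.reverse ≤ z.length := by
    have := lcpC_le_right o.reverse z.reverse
    simpa using this
  unfold hit
  rw [if_neg (no_del_len o z t ht (by omega))]
  have hvalid_drop : (o.drop (t+1) = z.drop t) ↔ z.length ≤ lcpC o.reverse z.reverse + t := by
    rw [drop_eq_iff_lcs o z (t+1) t (by omega) (by omega) (by omega)]
    omega
  have htr_iff : (((PySem.List.pyRange 0 (z.length:Int) 1).any fun u => o == pytranspose z (t:Int) u) = true)
      ↔ (z.length ≤ lcpC o.reverse z.reverse + t ∧ t < lcpC o z) := by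
    rw [any_trans_iff]
    constructor
    · rintro ⟨u, hu, hc⟩
      have hlen := congrArg List.length hc
      rw [length_pytranspose z t u ht hu] at hlen
      by_cases hut : u ≤ t
      · rw [if_pos hut] at hlen
        have hueq : u = t := by omega
        subst hueq
        rw [dup_iff o z u hu] at hc
        obtain ⟨hc1, hc2, hc3⟩ := hc
        rw [take_eq_iff_le_lcpC o z u (by omega) (by omega)] at hc1
        rw [hvalid_drop] at hc3
        refine ⟨hc3, ?_⟩
        by_contra hup
        have hue : u = lcpC o z := by omega
        apply getElem?_lcpC_ne o z (by omega) (by omega)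
        rw [← hue, hc2, List.getElem?_eq_getElem hu]
      · rw [if_neg hut] at hlen; omega
    · rintro ⟨hst, htp⟩
      refine ⟨t, ht, ?_⟩
      rw [dup_iff o z t ht]
      refine ⟨?_, ?_, hvalid_drop.mpr hst⟩
      · rw [take_eq_iff_le_lcpC o z t (by omega) (by omega)]; omega
      · rw [pointwise_lcpC o z t htp, List.getElem?_eq_getElem ht]
  have hins_iff : ((charlistP.any fun c => o == pyinsert z (t:Int) c) = true)
      ↔ (z.length ≤ lcpC o.reverse z.reverse + t ∧ t ≤ lcpC o z ∧ (∃ c ∈ charlistP, o[t]? = some c)) := by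
    rw [any_ins_iff]
    constructor
    · rintro ⟨c, hcl, hc⟩
      rw [ins_iff o z t c (le_of_lt ht)] at hc
      obtain ⟨hc1, hc2, hc3⟩ := hc
      rw [take_eq_iff_le_lcpC o z t (by omega) (by omega)] at hc1
      rw [hvalid_drop] at hc3
      exact ⟨hc3, hc1, ⟨c, hcl, hc2⟩⟩
    · rintro ⟨hst, htp, c, hcl, hc⟩
      refine ⟨c, hcl, ?_⟩
      rw [ins_iff o z t c (le_of_lt ht)]
      refine ⟨?_, hc, hvalid_drop.mpr hst⟩
      rw [take_eq_iff_le_lcpC o z t (by omega) (by omega)]; omega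
  by_cases hvt : z.length ≤ lcpC o.reverse z.reverse + t ∧ t < lcpC o z
  · rw [if_pos (htr_iff.mpr hvt), if_pos hvt]
  · rw [if_neg (fun hx => hvt (htr_iff.mp hx)), if_neg hvt]
    by_cases hvi : z.length ≤ lcpC o.reverse z.reverse + t ∧ t ≤ lcpC o z
        ∧ (∃ c ∈ charlistP, o[t]? = some c)
    · rw [if_pos (hins_iff.mpr hvi), if_pos hvi]
    · rw [if_neg (fun hx => hvi (hins_iff.mp hx)), if_neg hvi,
        if_neg (no_sub_len o z t ht (by omega))]

theorem caseC_A (o z : List Char) (step : String) (hm : o.length = z.length + 1) :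
    ((PySem.List.pyRange 0 (z.length:Int) 1).findSome? (hit o z step))
      = if 0 < z.length ∧ z.length - lcpC o.reverse z.reverse ≤ z.length - 1
            ∧ z.length - lcpC o.reverse z.reverse < lcpC o z then some (step ++ "t")
        else if 0 < z.length ∧ z.length - lcpC o.reverse z.reverse ≤ z.length - 1
            ∧ z.length - lcpC o.reverse z.reverse = lcpC o z
            ∧ (∃ c ∈ charlistP, o[lcpC o z]? = some c) then some (step ++ "i")
        else none := by
  have hsle : lcpC o.reverse z.reverse ≤ z.length := by
    have := lcpC_le_right o.reverse z.reverse
    simpa using this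
  have hple : lcpC o z ≤ z.length := lcpC_le_right o z
  by_cases hb1 : 0 < z.length ∧ z.length - lcpC o.reverse z.reverse ≤ z.length - 1
      ∧ z.length - lcpC o.reverse z.reverse < lcpC o z
  · rw [if_pos hb1]
    obtain ⟨hn0, hlo1, hlop⟩ := hb1
    have hlon : z.length - lcpC o.reverse z.reverse < z.length := by omega
    rw [PySem.List.pyRange_one_append 0 ((z.length - lcpC o.reverse z.reverse : Nat) : Int)
        (z.length : Int) (by omega) (by omega),
      List.findSome?_append,
      findSome?_none _ _ (fun x hx => by
        rw [PySem.List.mem_pyRange_one] at hx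
        rw [show x = ((x.toNat : Nat) : Int) by omega, hitC o z step hm x.toNat (by omega),
          if_neg (by rintro ⟨h1, h2⟩; omega), if_neg (by rintro ⟨h1, h2, h3⟩; omega)]),
      PySem.List.pyRange_one_cons (show ((z.length - lcpC o.reverse z.reverse : Nat) : Int) < (z.length : Int) by omega),
      List.findSome?_cons,
      hitC o z step hm (z.length - lcpC o.reverse z.reverse) hlon,
      if_pos ⟨by omega, hlop⟩]
    rfl
  · rw [if_neg hb1]
    by_cases hb2 : 0 < z.length ∧ z.length - lcpC o.reverse z.reverse ≤ z.length - 1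
        ∧ z.length - lcpC o.reverse z.reverse = lcpC o z
        ∧ (∃ c ∈ charlistP, o[lcpC o z]? = some c)
    · rw [if_pos hb2]
      obtain ⟨hn0, hlo1, hlop, hmem⟩ := hb2
      have hpn : lcpC o z < z.length := by omega
      rw [PySem.List.pyRange_one_append 0 ((lcpC o z : Nat) : Int) (z.length : Int) (by omega) (by omega),
        List.findSome?_append,
        findSome?_none _ _ (fun x hx => by
          rw [PySem.List.mem_pyRange_one] at hx
          rw [show x = ((x.toNat : Nat) : Int) by omega, hitC o z step hm x.toNat (by omega),
            if_neg (by rintro ⟨h1, h2⟩; omega), if_neg (by rintro ⟨h1, h2, h3⟩; omega)]),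
        PySem.List.pyRange_one_cons (show ((lcpC o z : Nat) : Int) < (z.length : Int) by omega),
        List.findSome?_cons,
        hitC o z step hm (lcpC o z) hpn,
        if_neg (by rintro ⟨h1, h2⟩; omega),
        if_pos ⟨by omega, le_refl _, hmem⟩]
      rfl
    · rw [if_neg hb2]
      apply findSome?_none
      intro x hx
      rw [PySem.List.mem_pyRange_one] at hx
      rw [show x = ((x.toNat : Nat) : Int) by omega, hitC o z step hm x.toNat (by omega),
        if_neg (by
          rintro ⟨h1, h2⟩
          exact hb1 ⟨by omega, by omega, by omega⟩),
        if_neg (by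
          rintro ⟨h1, h2, h3⟩
          rcases Nat.lt_or_ge x.toNat (lcpC o z) with hlt | hge
          · exact hb1 ⟨by omega, by omega, by omega⟩
          · have hxp : x.toNat = lcpC o z := by omega
            apply hb2
            refine ⟨by omega, by omega, by omega, ?_⟩
            rwa [hxp] at h3)]

-- bridge: dupOf ⟺ the "t" condition of caseC_A (for |orig| = |typo| + 1)
theorem dupOf_iff_lcp (o z : List Char) (hm : o.length = z.length + 1) :
    dupOf o z = true
      ↔ (0 < z.length ∧ z.length - lcpC o.reverse z.reverse ≤ z.length - 1
          ∧ z.length - lcpC o.reverse z.reverse < lcpC o z) := by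
  have hsle : lcpC o.reverse z.reverse ≤ z.length := by
    have := lcpC_le_right o.reverse z.reverse
    simpa using this
  unfold dupOf
  rw [List.any_eq_true]
  constructor
  · rintro ⟨t, htm, hbe⟩
    rw [List.mem_range] at htm
    rw [beq_iff_eq] at hbe
    have hdup : o = pytranspose z (t:Int) (t:Int) := by
      rw [dup_iff o z t htm]
      rw [eq_take_append_iff o z t (le_of_lt htm), drop_cons_iff,
        List.getD_eq_getElem z ' ' htm] at hbe
      exact hbe
    rw [dup_iff o z t htm] at hdup
    obtain ⟨hc1, hc2, hc3⟩ := hdup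
    rw [take_eq_iff_le_lcpC o z t (by omega) (by omega)] at hc1
    rw [drop_eq_iff_lcs o z (t+1) t (by omega) (by omega) (by omega)] at hc3
    have htake : o.take t = z.take t :=
      (take_eq_iff_le_lcpC o z t (by omega) (by omega)).mpr hc1
    have htp1 : o.take (t+1) = z.take (t+1) := by
      rw [List.take_succ, List.take_succ, hc2, List.getElem?_eq_getElem htm, htake]
    rw [take_eq_iff_le_lcpC o z (t+1) (by omega) (by omega)] at htp1
    refine ⟨by omega, by omega, by omega⟩
  · rintro ⟨hn0, hlo1, hlop⟩
    have hs1 : 1 ≤ lcpC o.reverse z.reverse := by omega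
    refine ⟨z.length - lcpC o.reverse z.reverse, by rw [List.mem_range]; omega, ?_⟩
    rw [beq_iff_eq]
    have ht : z.length - lcpC o.reverse z.reverse < z.length := by omega
    have hdup : o = pytranspose z ((z.length - lcpC o.reverse z.reverse : Nat):Int) ((z.length - lcpC o.reverse z.reverse : Nat):Int) := by
      rw [dup_iff o z _ ht]
      refine ⟨?_, ?_, ?_⟩
      · rw [take_eq_iff_le_lcpC o z _ (by omega) (by omega)]; omega
      · rw [pointwise_lcpC o z _ hlop, List.getElem?_eq_getElem ht]
      · rw [drop_eq_iff_lcs o z _ _ (by omega) (by omega) (by omega)]; omega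
    rw [dup_iff o z _ ht] at hdup
    obtain ⟨hc1, hc2, hc3⟩ := hdup
    rw [eq_take_append_iff o z _ (le_of_lt ht), drop_cons_iff,
      List.getD_eq_getElem z ' ' ht]
    exact ⟨hc1, hc2, hc3⟩

-- bridge: endInsOf ⟺ (suffix 0, prefix = |typo|, last char in charlist) (for |orig| = |typo| + 1)
theorem endInsOf_iff_lcp (o z : List Char) (hm : o.length = z.length + 1) :
    endInsOf o z = true
      ↔ (lcpC o.reverse z.reverse = 0 ∧ lcpC o z = z.length
          ∧ charlistP.contains (o.getD z.length ' ') = true) := by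
  have hple : lcpC o z ≤ z.length := lcpC_le_right o z
  unfold endInsOf
  simp only [Bool.and_eq_true, beq_iff_eq, Bool.or_eq_true, decide_eq_true_eq]
  have h1 : (o.take z.length = z) ↔ lcpC o z = z.length := by
    constructor
    · intro h
      have hx : o.take z.length = z.take z.length := by rw [h, List.take_length]
      rw [take_eq_iff_le_lcpC o z z.length (by omega) (by omega)] at hx
      omega
    · intro h
      have hx : o.take z.length = z.take z.length :=
        (take_eq_iff_le_lcpC o z z.length (by omega) (by omega)).mpr (by omega)
      rwa [List.take_length] at hx
  have h2 : ((z.length = 0 ∨ ¬ o.getD z.length ' ' = z.getD (z.length - 1) ' ')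
      ↔ lcpC o.reverse z.reverse = 0) := by
    by_cases hz : z.length = 0
    · constructor
      · intro _
        have : lcpC o.reverse z.reverse ≤ z.length := by
          have := lcpC_le_right o.reverse z.reverse; simpa using this
        omega
      · intro _; exact Or.inl hz
    · have hzpos : 0 < z.length := by omega
      have ho : o.getD z.length ' ' = o[z.length]'(by omega) :=
        List.getD_eq_getElem o ' ' (by omega)
      have hz2 : z.getD (z.length - 1) ' ' = z[z.length - 1]'(by omega) :=
        List.getD_eq_getElem z ' ' (by omega)
      constructor
      · rintro (h | h)
        · omega
        · by_contra hs
          have hs1 : 1 ≤ lcpC o.reverse z.reverse := by omega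
          rw [lcpC_pos_iff] at hs1
          obtain ⟨a, ha1, ha2⟩ := hs1
          rw [List.head?_reverse, List.getLast?_eq_getElem?] at ha1
          rw [List.head?_reverse, List.getLast?_eq_getElem?] at ha2
          apply h
          rw [ho, hz2]
          have e1 : o[o.length - 1]? = some a := ha1
          have e2 : z[z.length - 1]? = some a := ha2
          rw [show o.length - 1 = z.length by omega, List.getElem?_eq_getElem (show z.length < o.length by omega)] at e1
          rw [List.getElem?_eq_getElem (show z.length - 1 < z.length by omega)] at e2
          injection e1 with e1; injection e2 with e2
          rw [e1, e2]
      · intro hs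
        right
        intro hc
        rw [ho, hz2] at hc
        have : 1 ≤ lcpC o.reverse z.reverse := by
          rw [lcpC_pos_iff]
          refine ⟨o[z.length]'(by omega), ?_, ?_⟩
          · rw [List.head?_reverse, List.getLast?_eq_getElem?,
              show o.length - 1 = z.length by omega,
              List.getElem?_eq_getElem (show z.length < o.length by omega)]
          · rw [List.head?_reverse, List.getLast?_eq_getElem?,
              List.getElem?_eq_getElem (show z.length - 1 < z.length by omega), hc]
        omega
  constructor
  · rintro ⟨⟨ht, hcs⟩, hlast⟩
    exact ⟨h2.mp hlast, h1.mp ht, hcs⟩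
  · rintro ⟨hs, hp, hcs⟩
    exact ⟨⟨h1.mpr hp, hcs⟩, h2.mpr hs⟩

-- case |orig| ≥ |typo| + 2 : only A's malformed transpose(t,u) with u < t can match
theorem hitD2 (o z : List Char) (step : String) (hm : z.length + 2 ≤ o.length)
    (t : Nat) (ht : t < z.length) :
    hit o z step (t:Int)
      = if ((List.range t).any fun u =>
            o == z.take t ++ z.getD u ' ' :: z.getD t ' ' :: z.drop (u+1)) then some (step ++ "t")
        else none := by
  unfold hit
  rw [if_neg (no_del_len o z t ht (by omega))]
  have htr_iff : (((PySem.List.pyRange 0 (z.length:Int) 1).any fun u => o == pytranspose z (t:Int) u) = true)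
      ↔ (((List.range t).any fun u =>
            o == z.take t ++ z.getD u ' ' :: z.getD t ' ' :: z.drop (u+1)) = true) := by
    rw [any_trans_iff, List.any_eq_true]
    constructor
    · rintro ⟨u, hu, hc⟩
      have hlen := congrArg List.length hc
      rw [length_pytranspose z t u ht hu] at hlen
      by_cases hut : u ≤ t
      · rw [if_pos hut] at hlen
        have hult : u < t := by omega
        refine ⟨u, by rw [List.mem_range]; omega, ?_⟩
        rw [beq_iff_eq, ← trans_lt_eq z t u hult ht]
        exact hc
      · rw [if_neg hut] at hlen; omega
    · rintro ⟨u, hum, hbe⟩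
      rw [List.mem_range] at hum
      rw [beq_iff_eq, ← trans_lt_eq z t u hum ht] at hbe
      exact ⟨u, by omega, hbe⟩
  by_cases hc : ((List.range t).any fun u =>
      o == z.take t ++ z.getD u ' ' :: z.getD t ' ' :: z.drop (u+1)) = true
  · rw [if_pos (htr_iff.mpr hc), if_pos hc]
  · rw [if_neg (fun hx => hc (htr_iff.mp hx)), if_neg hc,
      if_neg (no_ins_len o z t ht (by omega)),
      if_neg (no_sub_len o z t ht (by omega))]

theorem caseD2 (o z : List Char) (step : String) (hm : z.length + 2 ≤ o.length) :
    ((PySem.List.pyRange 0 (z.length:Int) 1).findSome? (hit o z step))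
      = if stretchOf o z = true then some (step ++ "t") else none := by
  rw [findSome?_pyRange_const z.length (hit o z step) (step ++ "t")
    (fun t htn => by rw [hitD2 o z step hm t htn]; split <;> simp)]
  have hiff : (∃ t : Nat, t < z.length ∧ (hit o z step (t:Int)).isSome) ↔ stretchOf o z = true := by
    unfold stretchOf
    rw [List.any_eq_true]
    constructor
    · rintro ⟨t, htn, hsome⟩
      rw [hitD2 o z step hm t htn] at hsome
      refine ⟨t, by rw [List.mem_range]; omega, ?_⟩
      by_cases hc : ((List.range t).any fun u =>
          o == z.take t ++ z.getD u ' ' :: z.getD t ' ' :: z.drop (u+1)) = true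
      · exact hc
      · rw [if_neg hc] at hsome; simp at hsome
    · rintro ⟨t, htm, hany⟩
      rw [List.mem_range] at htm
      refine ⟨t, htm, ?_⟩
      rw [hitD2 o z step hm t htm, if_pos hany]
      simp
  by_cases hst : stretchOf o z = true
  · rw [if_pos (hiff.mpr hst), if_pos hst]
  · rw [if_neg (fun hx => hst (hiff.mp hx)), if_neg hst]

theorem getDeq_iff (o z : List Char) (i j : Nat) (hi : i < o.length) (hj : j < z.length) :
    (o.getD i ' ' = z.getD j ' ') ↔ o[i]? = z[j]? := by
  rw [List.getD_eq_getElem o ' ' hi, List.getD_eq_getElem z ' ' hj,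
    List.getElem?_eq_getElem hi, List.getElem?_eq_getElem hj]
  simp

set_option maxRecDepth 4096 in
theorem contains_iff (o : List Char) (i : Nat) (hi : i < o.length) :
    ((charsetB.contains (o.getD i ' ')) = true) ↔ (∃ c ∈ charlistP, o[i]? = some c) := by
  rw [List.getD_eq_getElem o ' ' hi]
  constructor
  · intro h
    have hmem : o[i]'hi ∈ charsetB := List.mem_of_elem_eq_true h
    unfold charsetB at hmem
    rw [PySem.Set.mem_ofList] at hmem
    exact ⟨o[i], hmem, List.getElem?_eq_getElem hi⟩
  · rintro ⟨c, hcl, hc⟩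
    rw [List.getElem?_eq_getElem hi] at hc
    injection hc with hc
    rw [hc]
    apply List.elem_eq_true_of_mem
    unfold charsetB
    rw [PySem.Set.mem_ofList]
    exact hcl

set_option maxRecDepth 4096 in
theorem containsP_iff (o : List Char) (i : Nat) (hi : i < o.length) :
    ((charlistP.contains (o.getD i ' ')) = true) ↔ (∃ c ∈ charlistP, o[i]? = some c) := by
  rw [List.getD_eq_getElem o ' ' hi]
  constructor
  · intro h
    exact ⟨o[i], List.mem_of_elem_eq_true h, List.getElem?_eq_getElem hi⟩
  · rintro ⟨c, hcl, hc⟩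
    rw [List.getElem?_eq_getElem hi] at hc
    injection hc with hc
    rw [hc]
    exact List.elem_eq_true_of_mem hcl

theorem mainE (orig typo step : String) (hne : orig.toList ≠ typo.toList)
    (hL : orig.toList.length + 2 ≤ typo.toList.length) :
    correct2 orig typo step = correct2_alt orig typo step := by
  rw [correct2_eq,
    findSome?_none _ _ (fun x hx => by
      rw [PySem.List.mem_pyRange_one] at hx
      rw [show x = ((x.toNat : Nat) : Int) by omega]
      exact hitE orig.toList typo.toList step x.toNat (by omega) hL)]
  simp only [correct2_alt, strLen]
  rw [if_neg hne, if_neg (by omega), if_neg (by omega), if_neg (by omega)]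
  rfl

theorem mainA (orig typo step : String) (hne : orig.toList ≠ typo.toList)
    (hL : orig.toList.length + 1 = typo.toList.length) :
    correct2 orig typo step = correct2_alt orig typo step := by
  rw [correct2_eq, caseA_A orig.toList typo.toList step hL]
  simp only [correct2_alt, strLen]
  rw [if_neg hne, if_pos (show (orig.toList.length : Int) = (typo.toList.length : Int) - 1 by omega)]
  by_cases hc : typo.toList.length ≤ lcpC orig.toList typo.toList
      + lcpC orig.toList.reverse typo.toList.reverse + 1
  · rw [if_pos hc, if_pos (by omega)]
    rfl
  · rw [if_neg hc, if_neg (by omega)]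
    rfl

theorem mainB (orig typo step : String) (hne : orig.toList ≠ typo.toList)
    (hm : orig.toList.length = typo.toList.length) :
    correct2 orig typo step = correct2_alt orig typo step := by
  rw [correct2_eq, caseB_A orig.toList typo.toList step hm hne]
  have hpn := p_lt_of_ne orig.toList typo.toList hm hne
  have hps := ps_lt_of_ne orig.toList typo.toList hm hne
  have hsle : lcpC orig.toList.reverse typo.toList.reverse ≤ typo.toList.length := by
    have := lcpC_le_right orig.toList.reverse typo.toList.reverse
    simpa using this
  by_cases hone : typo.toList.length ≤ lcpC orig.toList typo.toList
      + lcpC orig.toList.reverse typo.toList.reverse + 1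
  · rw [if_pos hone]
    by_cases hmem : ∃ c ∈ charlistP, orig.toList[lcpC orig.toList typo.toList]? = some c
    · rw [if_pos hmem]
      simp only [correct2_alt, strLen]
      rw [if_neg hne, Int.toNat_natCast]
      split
      · next g => exfalso; omega
      · next g =>
        split
        · next g0 =>
          split
          · next g1 =>
            split
            · next g2 => rfl
            · next g2 => exact absurd ((contains_iff orig.toList _ (by omega)).mpr hmem) g2
          · next g1 => exfalso; omega
        · next g0 => exfalso; omega
    · rw [if_neg hmem]
      simp only [correct2_alt, strLen]
      rw [if_neg hne, Int.toNat_natCast]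
      split
      · next g => exfalso; omega
      · next g =>
        split
        · next g0 =>
          split
          · next g1 =>
            split
            · next g2 => exact absurd ((contains_iff orig.toList _ (by omega)).mp g2) hmem
            · next g2 => rfl
          · next g1 => exfalso; omega
        · next g0 => exfalso; omega
  · rw [if_neg hone]
    have hqn : typo.toList.length - 1 - lcpC orig.toList.reverse typo.toList.reverse < typo.toList.length := by omega
    by_cases hcond : (orig.toList[lcpC orig.toList typo.toList]?
          = typo.toList[typo.toList.length - 1 - lcpC orig.toList.reverse typo.toList.reverse]?
        ∧ orig.toList[typo.toList.length - 1 - lcpC orig.toList.reverse typo.toList.reverse]?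
          = typo.toList[lcpC orig.toList typo.toList]?
        ∧ (orig.toList.drop (lcpC orig.toList typo.toList + 1)).take
            (typo.toList.length - 1 - lcpC orig.toList.reverse typo.toList.reverse - (lcpC orig.toList typo.toList + 1))
          = (typo.toList.drop (lcpC orig.toList typo.toList + 1)).take
            (typo.toList.length - 1 - lcpC orig.toList.reverse typo.toList.reverse - (lcpC orig.toList typo.toList + 1)))
    · rw [if_pos hcond]
      simp only [correct2_alt, strLen]
      rw [if_neg hne, Int.toNat_natCast,
        show (((typo.toList.length:Int)) - 1 - ((lcpC orig.toList.reverse typo.toList.reverse : Nat):Int)).toNat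
            = typo.toList.length - 1 - lcpC orig.toList.reverse typo.toList.reverse by omega,
        show (((lcpC orig.toList typo.toList : Nat) : Int) + 1)
            = ((lcpC orig.toList typo.toList + 1 : Nat) : Int) by omega,
        show (((typo.toList.length:Int)) - 1 - ((lcpC orig.toList.reverse typo.toList.reverse : Nat):Int))
            = ((typo.toList.length - 1 - lcpC orig.toList.reverse typo.toList.reverse : Nat) : Int) by omega,
        PySem.List.slice_natCast, PySem.List.slice_natCast]
      split
      · next g => exfalso; omega
      · next g =>
        split
        · next g0 =>
          split
          · next g1 => exfalso; omega
          · next g1 =>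
            split
            · next g2 => rfl
            · next g2 =>
              exact absurd ⟨(getDeq_iff orig.toList typo.toList _ _ (by omega) hqn).mpr hcond.1,
                (getDeq_iff orig.toList typo.toList _ _ (by omega) (by omega)).mpr hcond.2.1,
                hcond.2.2⟩ g2
        · next g0 => exfalso; omega
    · rw [if_neg hcond]
      simp only [correct2_alt, strLen]
      rw [if_neg hne, Int.toNat_natCast,
        show (((typo.toList.length:Int)) - 1 - ((lcpC orig.toList.reverse typo.toList.reverse : Nat):Int)).toNat
            = typo.toList.length - 1 - lcpC orig.toList.reverse typo.toList.reverse by omega,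
        show (((lcpC orig.toList typo.toList : Nat) : Int) + 1)
            = ((lcpC orig.toList typo.toList + 1 : Nat) : Int) by omega,
        show (((typo.toList.length:Int)) - 1 - ((lcpC orig.toList.reverse typo.toList.reverse : Nat):Int))
            = ((typo.toList.length - 1 - lcpC orig.toList.reverse typo.toList.reverse : Nat) : Int) by omega,
        PySem.List.slice_natCast, PySem.List.slice_natCast]
      split
      · next g => exfalso; omega
      · next g =>
        split
        · next g0 =>
          split
          · next g1 => exfalso; omega
          · next g1 =>
            split
            · next g2 =>
              exact absurd ⟨(getDeq_iff orig.toList typo.toList _ _ (by omega) hqn).mp g2.1,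
                (getDeq_iff orig.toList typo.toList _ _ (by omega) (by omega)).mp g2.2.1,
                g2.2.2⟩ hcond
            · next g2 => rfl
        · next g0 => exfalso; omega

theorem mainC (orig typo step : String) (hne : orig.toList ≠ typo.toList)
    (hm : orig.toList.length = typo.toList.length + 1)
    (hdup : dupOf orig.toList typo.toList = false)
    (hend : endInsOf orig.toList typo.toList = false) :
    correct2 orig typo step = correct2_alt orig typo step := by
  rw [correct2_eq, caseC_A orig.toList typo.toList step hm]
  have hsle : lcpC orig.toList.reverse typo.toList.reverse ≤ typo.toList.length := by
    have := lcpC_le_right orig.toList.reverse typo.toList.reverse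
    simpa using this
  have hple : lcpC orig.toList typo.toList ≤ typo.toList.length :=
    lcpC_le_right orig.toList typo.toList
  have hb1 : ¬(0 < typo.toList.length
      ∧ typo.toList.length - lcpC orig.toList.reverse typo.toList.reverse ≤ typo.toList.length - 1
      ∧ typo.toList.length - lcpC orig.toList.reverse typo.toList.reverse < lcpC orig.toList typo.toList) := by
    intro hc
    rw [← dupOf_iff_lcp orig.toList typo.toList hm] at hc
    rw [hdup] at hc
    exact Bool.false_ne_true hc
  rw [if_neg hb1]
  by_cases hb2 : 0 < typo.toList.length
      ∧ typo.toList.length - lcpC orig.toList.reverse typo.toList.reverse ≤ typo.toList.length - 1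
      ∧ typo.toList.length - lcpC orig.toList.reverse typo.toList.reverse = lcpC orig.toList typo.toList
      ∧ (∃ c ∈ charlistP, orig.toList[lcpC orig.toList typo.toList]? = some c)
  · rw [if_pos hb2]
    obtain ⟨hn0, hlo1, hlop, hmem⟩ := hb2
    simp only [correct2_alt, strLen]
    rw [if_neg hne, Int.toNat_natCast]
    rw [if_neg (by omega), if_neg (by omega), if_pos (by omega),
      if_pos ⟨by omega, (contains_iff orig.toList _ (by omega)).mpr hmem⟩]
    rfl
  · rw [if_neg hb2]
    simp only [correct2_alt, strLen]
    rw [if_neg hne, Int.toNat_natCast]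
    rw [if_neg (by omega), if_neg (by omega), if_pos (by omega),
      if_neg (show ¬((lcpC orig.toList typo.toList : Int) + (lcpC orig.toList.reverse typo.toList.reverse : Int) ≥ (typo.toList.length : Int)
          ∧ charsetB.contains (orig.toList.getD (lcpC orig.toList typo.toList) ' ') = true) by
        rintro ⟨hps, hcs⟩
        by_cases hs0 : lcpC orig.toList.reverse typo.toList.reverse = 0
        · -- end insertion: p = |typo|, s = 0
          have hpn : lcpC orig.toList typo.toList = typo.toList.length := by omega
          apply Bool.false_ne_true
          rw [← hend, endInsOf_iff_lcp orig.toList typo.toList hm]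
          refine ⟨hs0, hpn, ?_⟩
          rw [containsP_iff orig.toList _ (by omega)]
          rw [contains_iff orig.toList _ (by omega)] at hcs
          rw [← hpn]
          exact hcs
        · -- s ≥ 1
          have hs1 : 1 ≤ lcpC orig.toList.reverse typo.toList.reverse := by omega
          by_cases hlt : typo.toList.length - lcpC orig.toList.reverse typo.toList.reverse < lcpC orig.toList typo.toList
          · exact hb1 ⟨by omega, by omega, hlt⟩
          · have heq : typo.toList.length - lcpC orig.toList.reverse typo.toList.reverse = lcpC orig.toList typo.toList := by omega
            exact hb2 ⟨by omega, by omega, heq,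
              (contains_iff orig.toList _ (by omega)).mp hcs⟩)]
    rfl

theorem mainD (orig typo step : String) (hne : orig.toList ≠ typo.toList)
    (hm : typo.toList.length + 2 ≤ orig.toList.length)
    (hstr : stretchOf orig.toList typo.toList = false) :
    correct2 orig typo step = correct2_alt orig typo step := by
  rw [correct2_eq, caseD2 orig.toList typo.toList step hm,
    if_neg (by rw [hstr]; exact Bool.false_ne_true)]
  simp only [correct2_alt, strLen]
  rw [if_neg hne, if_neg (by omega), if_neg (by omega), if_neg (by omega)]
  rfl

theorem hit_ne_none_sub (o z : List Char) (step : String) (t : Int)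
    (h : (charlistP.any fun c => o == pysubst z t c) = true) : hit o z step t ≠ none := by
  unfold hit
  split_ifs <;> simp

theorem hit_ne_none_trans (o z : List Char) (step : String) (t : Int)
    (h : ((PySem.List.pyRange 0 (z.length:Int) 1).any fun u => o == pytranspose z t u) = true) :
    hit o z step t ≠ none := by
  unfold hit
  split_ifs <;> simp

theorem hit_some_shape (o z : List Char) (step : String) (t : Int) (r : String)
    (h : hit o z step t = some r) :
    r = step ++ "d" ∨ r = step ++ "t" ∨ r = step ++ "i" ∨ r = step ++ "s" := by
  unfold hit at h
  split_ifs at h <;>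
    first
      | (injection h with h; subst h; tauto)
      | exact Option.noConfusion h

theorem findSome?_ne_none {α β : Type} (l : List α) (f : α → Option β) (x : α)
    (hx : x ∈ l) (h : f x ≠ none) : l.findSome? f ≠ none := by
  induction l with
  | nil => simp at hx
  | cons a l ih =>
    rw [List.findSome?_cons]
    cases hfa : f a with
    | some b => simp
    | none =>
      rcases List.mem_cons.mp hx with rfl | hxl
      · exact absurd hfa h
      · exact ih hxl

theorem app_ne_x (st : String) (tl : String) (c : Char) (hc : tl.toList = [c])
    (hx : c ≠ 'x') : st ++ tl ≠ "x" := by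
  intro h
  have h2 := congrArg String.toList h
  rw [String.toList_append, hc] at h2
  cases hst : st.toList with
  | nil =>
    rw [hst] at h2
    simp at h2
    exact hx h2
  | cons a l =>
    rw [hst] at h2
    have := congrArg List.length h2
    simp at this

theorem app_ne_app (st : String) (a b : String) (h : a.toList ≠ b.toList) :
    st ++ a ≠ st ++ b := by
  intro hc
  have h2 := congrArg String.toList hc
  rw [String.toList_append, String.toList_append] at h2
  exact h (List.append_cancel_left h2)

theorem mainEq_equal (orig step : String)
    (hcs : ¬((orig.toList.any fun c => charlistP.contains c) = true))
    (hnd : orig.toList.Nodup) : correct2 orig orig step = "x" := by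
  rw [correct2_eq]
  have hnone : (PySem.List.pyRange 0 (orig.toList.length:Int) 1).findSome? (hit orig.toList orig.toList step) = none := by
    apply findSome?_none
    intro x hx
    rw [PySem.List.mem_pyRange_one] at hx
    rw [show x = ((x.toNat:Nat):Int) by omega]
    have ht : x.toNat < orig.toList.length := by omega
    unfold hit
    rw [if_neg (no_del_len orig.toList orig.toList x.toNat ht (by omega)),
      if_neg (show ¬(((PySem.List.pyRange 0 (orig.toList.length:Int) 1).any
          fun u => orig.toList == pytranspose orig.toList (x.toNat:Int) u) = true) by
        rw [any_trans_iff]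
        rintro ⟨u, hu, hc⟩
        have hlen := congrArg List.length hc
        rw [length_pytranspose orig.toList x.toNat u ht hu] at hlen
        by_cases hut : u ≤ x.toNat
        · rw [if_pos hut] at hlen; omega
        · have htu : x.toNat < u := by omega
          rw [trans_gt_iff orig.toList orig.toList x.toNat u htu hu] at hc
          obtain ⟨_, hc2, _, _, _⟩ := hc
          apply List.nodup_iff_getElem?_ne_getElem?.mp hnd x.toNat u htu hu
          rw [hc2, List.getElem?_eq_getElem hu]),
      if_neg (no_ins_len orig.toList orig.toList x.toNat ht (by omega)),
      if_neg (show ¬((charlistP.any fun c => orig.toList == pysubst orig.toList (x.toNat:Int) c) = true) by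
        rw [any_sub_iff]
        rintro ⟨c, hcl, hc⟩
        rw [sub_iff orig.toList orig.toList x.toNat c ht] at hc
        obtain ⟨_, hc2, _⟩ := hc
        rw [List.getElem?_eq_getElem ht] at hc2
        injection hc2 with hc2
        apply hcs
        rw [List.any_eq_true]
        exact ⟨orig.toList[x.toNat], List.getElem_mem ht, by rw [hc2]; exact List.elem_eq_true_of_mem hcl⟩)]
  rw [hnone]
  rfl

theorem len_ne_of_ne (o z : List Char) (h : o.length ≠ z.length) : o ≠ z := by
  intro hc; exact h (by rw [hc])

-- tight, region: orig = typo with one character duplicated (A "t", B "i"/"x")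
theorem tight_dup (orig typo step : String)
    (hm : orig.toList.length = typo.toList.length + 1)
    (hdup : dupOf orig.toList typo.toList = true) :
    correct2 orig typo step ≠ correct2_alt orig typo step := by
  have hne : orig.toList ≠ typo.toList := len_ne_of_ne _ _ (by omega)
  rw [correct2_eq, caseC_A orig.toList typo.toList step hm,
    if_pos ((dupOf_iff_lcp orig.toList typo.toList hm).mp hdup)]
  simp only [Option.getD_some]
  simp only [correct2_alt, strLen]
  rw [if_neg hne, if_neg (by omega), if_neg (by omega), if_pos (by omega)]
  split
  · exact app_ne_app step "t" "i" (by decide)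
  · exact app_ne_x step "t" 't' rfl (by decide)

-- tight, region: orig = typo plus a fresh trailing charlist character (A "x", B "i")
theorem tight_end (orig typo step : String)
    (hm : orig.toList.length = typo.toList.length + 1)
    (hend : endInsOf orig.toList typo.toList = true) :
    correct2 orig typo step ≠ correct2_alt orig typo step := by
  have hne : orig.toList ≠ typo.toList := len_ne_of_ne _ _ (by omega)
  obtain ⟨hs0, hpe, hcs⟩ := (endInsOf_iff_lcp orig.toList typo.toList hm).mp hend
  have hsle : lcpC orig.toList.reverse typo.toList.reverse ≤ typo.toList.length := by
    have := lcpC_le_right orig.toList.reverse typo.toList.reverse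
    simpa using this
  rw [correct2_eq, caseC_A orig.toList typo.toList step hm,
    if_neg (by rintro ⟨h1, h2, h3⟩; omega),
    if_neg (by rintro ⟨h1, h2, h3, h4⟩; omega)]
  simp only [Option.getD_none]
  simp only [correct2_alt, strLen]
  rw [if_neg hne, Int.toNat_natCast, if_neg (by omega), if_neg (by omega), if_pos (by omega),
    if_pos ⟨by omega, by
      rw [contains_iff orig.toList _ (by omega)]
      rw [containsP_iff orig.toList _ (by omega)] at hcs
      rw [hpe]
      exact hcs⟩]
  exact fun hc => app_ne_x step "i" 'i' rfl (by decide) hc.symm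

-- tight, region: orig two or more chars longer, matching A's malformed transpose (A "t", B "x")
theorem tight_stretch (orig typo step : String)
    (hm : typo.toList.length + 2 ≤ orig.toList.length)
    (hstr : stretchOf orig.toList typo.toList = true) :
    correct2 orig typo step ≠ correct2_alt orig typo step := by
  have hne : orig.toList ≠ typo.toList := len_ne_of_ne _ _ (by omega)
  rw [correct2_eq, caseD2 orig.toList typo.toList step hm, if_pos hstr]
  simp only [Option.getD_some]
  simp only [correct2_alt, strLen]
  rw [if_neg hne, if_neg (by omega), if_neg (by omega), if_neg (by omega)]
  exact app_ne_x step "t" 't' rfl (by decide)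

-- ===== VERDICT (by name: the statement is the Claim_ definition above) =====
theorem correct2_spec : Claim_unchanged_correct2 := by
  unfold Claim_unchanged_correct2
  intro orig typo step _
  unfold Spec_correct2
  intro hD
  by_cases heq : orig = typo
  · subst heq
    by_cases h0 : orig = ""
    · subst h0; rfl
    · have hcond : ¬((orig.toList.any fun c => charlistP.contains c) = true ∨ ¬ orig.toList.Nodup) :=
        fun hc => hD (by unfold D_correct2; exact Or.inl ⟨rfl, h0, hc⟩)
      push_neg at hcond
      obtain ⟨hcs, hnd⟩ := hcond
      have halt : correct2_alt orig orig step = "x" := by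
        simp [correct2_alt]
      rw [halt]
      exact mainEq_equal orig step hcs hnd
  · have hne : orig.toList ≠ typo.toList := fun hc => heq (String.toList_inj.mp hc)
    rcases show orig.toList.length + 2 ≤ typo.toList.length
        ∨ orig.toList.length + 1 = typo.toList.length
        ∨ orig.toList.length = typo.toList.length
        ∨ orig.toList.length = typo.toList.length + 1
        ∨ typo.toList.length + 2 ≤ orig.toList.length by omega with hE | hA | hB | hC | hD'
    · exact mainE orig typo step hne hE
    · exact mainA orig typo step hne hA
    · exact mainB orig typo step hne hB
    · have hdup : dupOf orig.toList typo.toList = false := by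
        by_contra hc
        exact hD (by
          unfold D_correct2
          exact Or.inr (Or.inl ⟨hC, Or.inl (by revert hc; cases dupOf orig.toList typo.toList <;> simp)⟩))
      have hend : endInsOf orig.toList typo.toList = false := by
        by_contra hc
        exact hD (by
          unfold D_correct2
          exact Or.inr (Or.inl ⟨hC, Or.inr (by revert hc; cases endInsOf orig.toList typo.toList <;> simp)⟩))
      exact mainC orig typo step hne hC hdup hend
    · have hstr : stretchOf orig.toList typo.toList = false := by
        by_contra hc
        exact hD (by
          unfold D_correct2
          exact Or.inr (Or.inr ⟨hD', by revert hc; cases stretchOf orig.toList typo.toList <;> simp⟩))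
      exact mainD orig typo step hne hD' hstr

theorem correct2_changed : Claim_changed_correct2 := by
  unfold Claim_changed_correct2; decide

theorem correct2_tight : Claim_exact_correct2 := by
  unfold Claim_exact_correct2
  intro orig typo step _ hD
  unfold D_correct2 at hD
  rcases hD with ⟨heq, hne0, hcond⟩ | ⟨hm, hdup | hend⟩ | ⟨hm, hstr⟩
  · subst heq
    have halt : correct2_alt orig orig step = "x" := by
      simp [correct2_alt]
    rw [halt, correct2_eq]
    have hex : ∃ t : Int, t ∈ PySem.List.pyRange 0 (orig.toList.length:Int) 1
        ∧ hit orig.toList orig.toList step t ≠ none := by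
      rcases hcond with hcs | hdup
      · rw [List.any_eq_true] at hcs
        obtain ⟨c, hcmem, hccl⟩ := hcs
        obtain ⟨t, ht, rfl⟩ := List.mem_iff_getElem.mp hcmem
        refine ⟨(t:Int), by rw [PySem.List.mem_pyRange_one]; omega, ?_⟩
        apply hit_ne_none_sub
        rw [any_sub_iff]
        refine ⟨orig.toList[t], List.mem_of_elem_eq_true hccl, ?_⟩
        rw [sub_iff orig.toList orig.toList t _ ht]
        exact ⟨rfl, List.getElem?_eq_getElem ht, rfl⟩
      · rw [List.nodup_iff_getElem?_ne_getElem?] at hdup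
        push_neg at hdup
        obtain ⟨i, j, hij, hjn, hdup⟩ := hdup
        refine ⟨(i:Int), by rw [PySem.List.mem_pyRange_one]; omega, ?_⟩
        apply hit_ne_none_trans
        rw [any_trans_iff]
        refine ⟨j, hjn, ?_⟩
        rw [trans_gt_iff orig.toList orig.toList i j hij hjn]
        refine ⟨rfl, ?_, rfl, ?_, rfl⟩
        · rw [hdup, List.getElem?_eq_getElem hjn]
        · rw [← hdup, List.getElem?_eq_getElem (show i < orig.toList.length by omega)]
    obtain ⟨t, htmem, hht⟩ := hex
    cases hfs : (PySem.List.pyRange 0 (orig.toList.length:Int) 1).findSome? (hit orig.toList orig.toList step) with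
    | none => exact absurd hfs (findSome?_ne_none _ _ t htmem hht)
    | some r =>
      obtain ⟨x, hxl, hfx⟩ := List.exists_of_findSome?_eq_some hfs
      simp only [Option.getD_some]
      rcases hit_some_shape _ _ _ _ _ hfx with h | h | h | h <;> rw [h]
      · exact app_ne_x step "d" 'd' rfl (by decide)
      · exact app_ne_x step "t" 't' rfl (by decide)
      · exact app_ne_x step "i" 'i' rfl (by decide)
      · exact app_ne_x step "s" 's' rfl (by decide)
  · exact tight_dup orig typo step hm hdup
  · exact tight_end orig typo step hm hend
  · exact tight_stretch orig typo step hm hstr
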